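-- pv_equiv track=rewrite | github.com/Shmeeck/LazyLetter | CoverLetterExpress/search.py | each_letter
-- ===== SOURCE A (Python) =====
-- def each_letter(li, answer):
--     """
--     Takes a list of lower-cased options and a string and returns back a list
--     of options that only contain all letters of the string with order.
--     """
--     result = []
--     answer = answer.replace(' ', '')
--
--     for item in li:
--         letter_pos = 0
--         success = True
--
--         for letter in answer.lower():
--             letter_pos = item.lower().find(letter, letter_pos)
--
--             if letter_pos < 0:
--                 success = False
--                 break
--
--         if success:
--             result.append(item)
--
--     return result
-- ===== SOURCE B (Python) =====
-- def each_letter(li, answer):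
--     """
--     Takes a list of lower-cased options and a string and returns back a list
--     of options that only contain all letters of the string with order.
--
--     A matching letter is searched for from the position of the previous match
--     (inclusive), so a run of repeated letters in the string is satisfied by a
--     single occurrence: collapse runs once, up front, then test the collapsed
--     pattern as a plain subsequence with a consuming iterator.
--     """
--     target = answer.replace(' ', '').lower()
--
--     pattern = []
--     for c in target:
--         if not pattern or pattern[-1] != c:
--             pattern.append(c)
--
--     def contains(item):
--         it = iter(item.lower())
--         return all(letter in it for letter in pattern)
--
--     return [item for item in li if contains(item)]
-- ===== Notes on version B (the rewrite author's own statement) =====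
-- stated objective: faster
-- what changed: B builds the processed answer once with runs of equal letters collapsed (making explicit that A's find restarts at the previous match, so a run is satisfied by one occurrence) and keeps items via the consuming-iterator subsequence idiom over a single item.lower(), where A re-lowercases the item and calls str.find for every answer letter.
import Mathlib
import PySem

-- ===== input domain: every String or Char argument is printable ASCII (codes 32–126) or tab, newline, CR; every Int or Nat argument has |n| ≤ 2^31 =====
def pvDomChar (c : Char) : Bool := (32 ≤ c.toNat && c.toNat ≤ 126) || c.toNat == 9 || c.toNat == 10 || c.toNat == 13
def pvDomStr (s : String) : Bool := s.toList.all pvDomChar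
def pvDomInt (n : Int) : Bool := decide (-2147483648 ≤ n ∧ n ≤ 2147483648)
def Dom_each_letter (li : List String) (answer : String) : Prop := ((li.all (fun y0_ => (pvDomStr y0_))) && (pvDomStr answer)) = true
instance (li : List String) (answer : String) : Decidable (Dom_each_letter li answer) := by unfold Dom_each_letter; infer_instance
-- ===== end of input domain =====

-- B precomputes the lower-cased answer with runs of equal letters collapsed (exactly what A's
-- find-from-previous-match position accepts) and tests it as a plain subsequence by consuming
-- the item once; A re-lowercases the item for every answer letter and tracks find indices.


-- ===== PORT A =====
-- the inner `for letter in answer.lower(): letter_pos = item.lower().find(letter, letter_pos); …` loop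
def eachLetterLoop (itemLow : List Char) : List Char → Int → Bool
  | [], _ => true
  | c :: rest, pos =>
    let p := PySem.Chars.findFrom itemLow [c] pos none
    if p < 0 then false
    else eachLetterLoop itemLow rest p

def each_letter (li : List String) (answer : String) : List String :=
  let answer' := PySem.Str.replace answer " " ""
  li.foldl (fun result item =>
      if eachLetterLoop (PySem.Chars.lower item.toList)
          (PySem.Chars.lower answer'.toList) 0
      then result ++ [item] else result) []

-- ===== PORT B =====
-- `it = iter(item.lower()); all(letter in it for letter in pattern)`: each `letter in it`
-- consumes the iterator up to and including the first match
def consumesAll : List Char → List Char → Bool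
  | [], _ => true
  | _ :: _, [] => false
  | c :: cs, x :: xs => if x == c then consumesAll cs xs else consumesAll (c :: cs) xs

def each_letter_alt (li : List String) (answer : String) : List String :=
  let target := (PySem.Str.lower (PySem.Str.replace answer " " "")).toList
  -- `if not pattern or pattern[-1] != c: pattern.append(c)`
  let pattern := target.foldl
    (fun acc c => if acc.isEmpty || acc.getLast? != some c then acc ++ [c] else acc) []
  li.filter (fun item => consumesAll pattern (PySem.Chars.lower item.toList))

-- ===== PRECONDITION & SPEC =====
def Spec_each_letter (li : List String) (answer : String) (out : List String) : Prop :=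
  out = each_letter_alt li answer
instance (li : List String) (answer : String) (out : List String) : Decidable (Spec_each_letter li answer out) := by
  unfold Spec_each_letter; infer_instance

-- ===== CLAIM (what is proved, stated in full; the proofs are below) =====
def Claim_equal_each_letter : Prop := ∀ (li : List String) (answer : String), Dom_each_letter li answer → Spec_each_letter li answer (each_letter li answer)

-- ===== LEMMAS AND PROOFS =====

theorem mem_iff_singleton_infix {c : Char} {xs : List Char} : c ∈ xs ↔ [c] <:+: xs :=
  Iff.symm (List.singleton_infix_iff c xs)

theorem singleton_prefix_iff_head {c : Char} {ys : List Char} :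
    [c] <+: ys ↔ ys.head? = some c := by
  cases ys with
  | nil => simp
  | cons y ys =>
    constructor
    · rintro ⟨t, ht⟩; cases ht; simp
    · intro h; simp at h; subst h; exact ⟨ys, rfl⟩

theorem dropWhile_ne_spec {c : Char} {xs : List Char} (h : c ∈ xs) :
    ∃ ys, xs.dropWhile (fun x => x != c) = c :: ys := by
  induction xs with
  | nil => simp at h
  | cons x xs ih =>
    by_cases hx : x = c
    · subst hx; exact ⟨xs, by simp [List.dropWhile]⟩
    · have : c ∈ xs := by simp at h; tauto
      obtain ⟨ys, hys⟩ := ih this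
      exact ⟨ys, by simp [bne_iff_ne.2 hx, hys]⟩

theorem drop_eq_dropWhile_of_first {c : Char} :
    ∀ (xs : List Char) (p : Nat), xs[p]? = some c → (∀ i < p, xs[i]? ≠ some c) →
      xs.drop p = xs.dropWhile (fun x => x != c)
  | [], p, hp, _ => by simp at hp
  | x :: xs, 0, hp, _ => by
      simp at hp; subst hp; simp [List.dropWhile]
  | x :: xs, p + 1, hp, hmin => by
      have hx : x ≠ c := by
        intro h; exact hmin 0 (Nat.succ_pos _) (by simp [h])
      have ih := drop_eq_dropWhile_of_first xs p (by simpa using hp)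
        (fun i hi => by have := hmin (i + 1) (by omega); simpa using this)
      have hbne : (x != c) = true := bne_iff_ne.2 hx
      simp [hbne]
      exact ih

theorem drop_find_toNat {c : Char} {xs : List Char} (h : c ∈ xs) :
    xs.drop (PySem.Chars.find xs [c]).toNat = xs.dropWhile (fun x => x != c) := by
  have hnn : 0 ≤ PySem.Chars.find xs [c] :=
    (PySem.Chars.find_nonneg_iff xs [c]).2 (mem_iff_singleton_infix.1 h)
  obtain ⟨h1, h2⟩ := PySem.Chars.find_spec hnn
  apply drop_eq_dropWhile_of_first
  · have := singleton_prefix_iff_head.1 h1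
    simpa [List.head?_drop] using this
  · intro i hi hic
    exact h2 i hi (singleton_prefix_iff_head.2 (by simpa [List.head?_drop] using hic))

-- A's inner loop, rephrased on the suffix it is really scanning
def aGo : List Char → List Char → Bool
  | [], _ => true
  | c :: cs, xs =>
    if c ∈ xs then aGo cs (xs.dropWhile (fun x => x != c)) else false

theorem loop_eq_aGo (itemLow : List Char) (t : List Char) :
    ∀ (k : Nat), k ≤ itemLow.length →
      eachLetterLoop itemLow t (k : Int) = aGo t (itemLow.drop k) := by
  induction t with
  | nil => intro k hk; rfl
  | cons c rest ih =>
    intro k hk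
    rw [eachLetterLoop]
    rw [PySem.Chars.findFrom_natCast itemLow [c] k hk]
    by_cases hmem : c ∈ itemLow.drop k
    · have hinf : [c] <:+: itemLow.drop k := mem_iff_singleton_infix.1 hmem
      have hne : PySem.Chars.find (itemLow.drop k) [c] ≠ -1 :=
        PySem.Chars.find_ne_neg_one_iff (itemLow.drop k) [c] |>.2 hinf
      have hnn : 0 ≤ PySem.Chars.find (itemLow.drop k) [c] :=
        (PySem.Chars.find_nonneg_iff (itemLow.drop k) [c]).2 hinf
      set f := PySem.Chars.find (itemLow.drop k) [c] with hf
      have hle : f ≤ (itemLow.drop k).length := PySem.Chars.find_le_length _ _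
      have hcast : (k : Int) + f = ((k + f.toNat : Nat) : Int) := by omega
      rw [List.length_drop] at hle
      have hk2 : k + f.toNat ≤ itemLow.length := by omega
      rw [if_neg hne, if_neg (by omega : ¬ ((k : Int) + f < 0))]
      rw [hcast, ih _ hk2]
      rw [aGo, if_pos hmem]
      congr 1
      rw [← drop_find_toNat hmem, List.drop_drop]
    · have heq : PySem.Chars.find (itemLow.drop k) [c] = -1 :=
        PySem.Chars.find_eq_neg_one_iff (itemLow.drop k) [c] |>.2
          (fun hinf => hmem (mem_iff_singleton_infix.2 hinf))
      rw [if_pos heq, if_pos (by norm_num)]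
      rw [aGo, if_neg hmem]

theorem consumesAll_cons (c : Char) (ts : List Char) :
    ∀ xs, consumesAll (c :: ts) xs =
      if c ∈ xs then consumesAll ts ((xs.dropWhile (fun x => x != c)).tail) else false := by
  intro xs
  induction xs with
  | nil => simp [consumesAll]
  | cons x xs ih =>
    by_cases hx : x = c
    · subst hx
      simp [consumesAll, List.dropWhile_cons]
    · have hbne : (x != c) = true := bne_iff_ne.2 hx
      rw [consumesAll, if_neg (by simpa [beq_iff_eq] using hx), ih]
      by_cases hc : c ∈ xs
      · rw [if_pos hc, if_pos (List.mem_cons_of_mem _ hc), List.dropWhile_cons, if_pos hbne]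
      · rw [if_neg hc, if_neg (by simp [hc]; exact fun h => absurd h.symm hx)]

theorem destutter'_head (d : Char) (rest : List Char) :
    ∃ ws, List.destutter' (· ≠ ·) d rest = d :: ws := by
  induction rest generalizing d with
  | nil => exact ⟨[], rfl⟩
  | cons b l ih =>
    by_cases h : d ≠ b
    · exact ⟨List.destutter' (· ≠ ·) b l, List.destutter'_cons_pos _ h⟩
    · rw [List.destutter'_cons_neg _ h]; exact ih d

theorem aGo_destutter' (cs : List Char) :
    ∀ (c : Char) (xs : List Char),
      aGo (c :: cs) xs = consumesAll (List.destutter' (· ≠ ·) c cs) xs := by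
  induction cs with
  | nil =>
    intro c xs
    rw [List.destutter'_nil, aGo, consumesAll_cons]
    split_ifs <;> simp [aGo, consumesAll]
  | cons d rest ih =>
    intro c xs
    by_cases hcd : c ≠ d
    · rw [List.destutter'_cons_pos _ hcd, consumesAll_cons, aGo]
      by_cases hmem : c ∈ xs
      · rw [if_pos hmem, if_pos hmem]
        obtain ⟨ys', hys⟩ := dropWhile_ne_spec hmem
        rw [ih d, hys]
        obtain ⟨ws, hws⟩ := destutter'_head d rest
        rw [hws, consumesAll, if_neg (by simpa [beq_iff_eq] using hcd)]
        simp
      · rw [if_neg hmem, if_neg hmem]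
    · push_neg at hcd; subst hcd
      rw [List.destutter'_cons_neg _ (by simp), ← ih c]
      have L : aGo (c :: c :: rest) xs =
          if c ∈ xs then aGo (c :: rest) (xs.dropWhile (fun x => x != c)) else false := by
        rw [aGo]
      have R : aGo (c :: rest) xs =
          if c ∈ xs then aGo rest (xs.dropWhile (fun x => x != c)) else false := by
        rw [aGo]
      rw [L, R]
      by_cases hmem : c ∈ xs
      · rw [if_pos hmem, if_pos hmem]
        obtain ⟨ys', hys⟩ := dropWhile_ne_spec hmem
        rw [aGo, if_pos (by rw [hys]; exact List.mem_cons_self ..)]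
        congr 1
        rw [hys]
        simp [List.dropWhile_cons]
      · rw [if_neg hmem, if_neg hmem]

theorem aGo_eq_consumesAll_destutter (t xs : List Char) :
    aGo t xs = consumesAll (t.destutter (· ≠ ·)) xs := by
  cases t with
  | nil => simp [aGo, consumesAll, List.destutter_nil]
  | cons c cs => rw [List.destutter_cons', aGo_destutter']

-- B's run-collapsing fold builds exactly List.destutter (· ≠ ·)
theorem foldl_collapse (t : List Char) :
    ∀ (acc : List Char) (a : Char),
      t.foldl (fun acc c => if acc.isEmpty || acc.getLast? != some c then acc ++ [c] else acc)
          (acc ++ [a]) =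
        acc ++ List.destutter' (· ≠ ·) a t := by
  induction t with
  | nil => intro acc a; simp [List.destutter'_nil]
  | cons b l ih =>
    intro acc a
    rw [List.foldl_cons]
    by_cases hab : a ≠ b
    · rw [if_pos (by simp [List.getLast?_concat]; exact hab)]
      rw [List.append_assoc acc [a] [b]]
      rw [show ([a] ++ [b] : List Char) = [a] ++ [b] from rfl]
      rw [← List.append_assoc acc [a] [b], ih (acc ++ [a]) b]
      rw [List.destutter'_cons_pos _ hab]
      simp
    · push_neg at hab; subst hab
      rw [if_neg (by simp [List.getLast?_concat])]
      rw [ih acc a, List.destutter'_cons_neg _ (by simp)]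

theorem collapse_eq_destutter (t : List Char) :
    t.foldl (fun acc c => if acc.isEmpty || acc.getLast? != some c then acc ++ [c] else acc) []
      = t.destutter (· ≠ ·) := by
  cases t with
  | nil => rfl
  | cons c rest =>
    rw [List.foldl_cons, if_pos (by simp), List.destutter_cons']
    simpa using foldl_collapse rest [] c

theorem each_letter_eq_filter (li : List String) (answer : String) :
    each_letter li answer =
      li.filter (fun item =>
        eachLetterLoop (PySem.Chars.lower item.toList)
          (PySem.Chars.lower (PySem.Str.replace answer " " "").toList) 0) := by
  simp [each_letter, PySem.List.foldl_append_if_eq_filter]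

theorem each_letter_alt_eq_filter (li : List String) (answer : String) :
    each_letter_alt li answer =
      li.filter (fun item =>
        consumesAll ((PySem.Chars.lower (PySem.Str.replace answer " " "").toList).destutter (· ≠ ·))
          (PySem.Chars.lower item.toList)) := by
  simp only [each_letter_alt, PySem.Str.toList_lower, collapse_eq_destutter]

-- ===== VERDICT (by name: the statement is the Claim_ definition above) =====
theorem each_letter_spec : Claim_equal_each_letter := by
  intro li answer _
  unfold Spec_each_letter
  rw [each_letter_eq_filter, each_letter_alt_eq_filter]
  apply List.filter_congr
  intro item _
  have h0 : ((0 : Nat) : Int) = (0 : Int) := rfl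
  rw [← h0, loop_eq_aGo _ _ 0 (Nat.zero_le _), List.drop_zero, aGo_eq_consumesAll_destutter]
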